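-- pv_equiv track=rewrite | github.com/sathish-selvan/Eulers_Problem | 37Truncatable primes.py | trunk
-- ===== SOURCE A (Python) =====
-- def trunk(n):
--     res = set()
--     res.add(n)
--     a = n
--     while n != 0:
--         b = n//10
--         res.add(b)
--         n = b
--     for i in range(len(str(a)), 0, -1):
--         c = a % (10**i)
--         res.add(c)
--         a = c
--     res.remove(0)
--     return res
-- ===== SOURCE B (Python) =====
-- def _value(digits):
--     # evaluate a string of decimal digit characters by Horner's rule
--     v = 0
--     for c in digits:
--         v = 10 * v + (ord(c) - 48)
--     return v
--
-- def trunk(n):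
--     s = str(n)
--     res = set()
--     for i in range(len(s), 0, -1):      # right truncations, longest first
--         res.add(_value(s[:i]))
--     for i in range(1, len(s)):          # proper left truncations, longest first
--         res.add(_value(s[i:]))
--     res.discard(0)
--     return res
-- ===== Notes on version B (the rewrite author's own statement) =====
-- stated objective: alternative
-- what changed: A truncates arithmetically (a while loop of repeated n//10 and a chained a % 10**i loop); B never divides: it slices the decimal string str(n) once and evaluates each prefix s[:i] and suffix s[i:] with Horner's rule over the digit characters, finishing with discard(0) instead of add-0/remove(0).
import Mathlib
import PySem

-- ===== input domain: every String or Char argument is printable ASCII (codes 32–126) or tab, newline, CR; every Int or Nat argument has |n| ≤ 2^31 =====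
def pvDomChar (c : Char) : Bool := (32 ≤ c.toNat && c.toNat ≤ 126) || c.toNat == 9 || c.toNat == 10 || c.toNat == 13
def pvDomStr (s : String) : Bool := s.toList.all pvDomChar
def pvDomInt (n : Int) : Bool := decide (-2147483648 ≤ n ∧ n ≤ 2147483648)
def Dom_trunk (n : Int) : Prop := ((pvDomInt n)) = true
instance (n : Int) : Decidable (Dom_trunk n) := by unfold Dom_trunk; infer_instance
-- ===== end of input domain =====

-- B replaces A's division/modulo truncation loops by slicing the decimal string once and
-- evaluating each slice with Horner's rule (objective: alternative, not claimed faster).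

-- ===== PORT A =====
-- while n != 0: b = n // 10; res.add(b); n = b
-- Python loops forever when n < 0 (excluded by Pre_trunk); the 'n ≤ 0' guard only makes the
-- recursion total and agrees with 'n != 0' on every n ≥ 0.
-- while n != 0: b = n // 10; res.add(b); n = b
-- Python loops forever when n < 0 (excluded by Pre_trunk). The loop runs at most n.toNat
-- times on n ≥ 0, so the fuel argument is a pure totality guard (kernel-reducible),
-- and the 'n ≤ 0' guard agrees with 'n != 0' on every n ≥ 0.
def trunkWhileF : ℕ → PySem.Set Int → Int → PySem.Set Int
  | 0, res, _ => res
  | fuel + 1, res, n =>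
    if n ≤ 0 then res
    else trunkWhileF fuel (PySem.Set.add res (PySem.Int.floordiv n 10)) (PySem.Int.floordiv n 10)

def trunkWhile (res : PySem.Set Int) (n : Int) : PySem.Set Int := trunkWhileF n.toNat res n

def trunk (n : Int) : List Int :=
  let res0 : PySem.Set Int := PySem.Set.add PySem.Set.empty n      -- res = set(); res.add(n)
  let a := n
  let res1 := trunkWhile res0 n                                    -- the while loop
  -- for i in range(len(str(a)), 0, -1): c = a % 10**i; res.add(c); a = c
  -- (every i produced by this range is ≥ 1, so '10 ^ i.toNat' is exactly 10**i)
  let st := (PySem.List.pyRange (PySem.Str.len (PySem.Int.toStr a)) 0 (-1)).foldl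
    (fun (st : PySem.Set Int × Int) i =>
      let c := PySem.Int.mod st.2 ((10 : Int) ^ i.toNat)
      (PySem.Set.add st.1 c, c)) (res1, a)
  -- res.remove(0): under Pre_trunk 0 was inserted by the while loop (or is n itself), so no KeyError
  (PySem.Set.remove? st.1 0).getD []

-- ===== PORT B =====
-- def _value(digits): v = 0; for c in digits: v = 10*v + (ord(c) - 48); return v
def pvHorner (cs : List Char) : Int :=
  cs.foldl (fun v c => 10 * v + ((c.toNat : Int) - 48)) 0

-- s = str(n)
-- for i in range(len(s), 0, -1): res.add(_value(s[:i]))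
-- for i in range(1, len(s)):     res.add(_value(s[i:]))
-- res.discard(0)
-- string slices are ported through PySem.List.slice on s.toList (exact on every input)
def trunk_alt (n : Int) : List Int :=
  let s := (PySem.Int.toStr n).toList
  let res1 := (PySem.List.pyRange (PySem.Str.len (PySem.Int.toStr n)) 0 (-1)).foldl
    (fun res i => PySem.Set.add res (pvHorner (PySem.List.slice s none (some i))))
    PySem.Set.empty
  let res2 := (PySem.List.pyRange 1 (PySem.Str.len (PySem.Int.toStr n)) 1).foldl
    (fun res i => PySem.Set.add res (pvHorner (PySem.List.slice s (some i) none)))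
    res1
  PySem.Set.discard res2 0

-- ===== PRECONDITION & SPEC =====
-- Pre_ excludes n < 0, on which Python A's 'while n != 0' loop never terminates.
def Pre_trunk (n : Int) : Prop := 0 ≤ n
instance (n : Int) : Decidable (Pre_trunk n) := by unfold Pre_trunk; infer_instance

def pvWitness_trunk : Int := 3797

def Spec_trunk (n : Int) (out : List Int) : Prop := out = trunk_alt n
instance (n : Int) (out : List Int) : Decidable (Spec_trunk n out) := by unfold Spec_trunk; infer_instance

-- ===== CLAIM (what is proved, stated in full; the proofs are below) =====
def Claim_equal_trunk : Prop := ∀ (n : Int), Dom_trunk n → Pre_trunk n → Spec_trunk n (trunk n)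

-- ===== LEMMAS AND PROOFS =====

-- decimal digits of a natural number, most significant first
def pvDigits (m : ℕ) : List ℕ :=
  if _h : m < 10 then [m] else pvDigits (m / 10) ++ [m % 10]
termination_by m
decreasing_by exact Nat.div_lt_self (by omega) (by norm_num)

lemma pvDigits_lt (m : ℕ) : ∀ d ∈ pvDigits m, d < 10 := by
  induction m using pvDigits.induct with
  | case1 m h =>
    intro d hd
    rw [pvDigits, dif_pos h] at hd
    simp only [List.mem_singleton] at hd
    subst hd; exact h
  | case2 m h ih =>
    intro d hd
    rw [pvDigits, dif_neg h] at hd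
    rcases List.mem_append.mp hd with h1 | h1
    · exact ih d h1
    · simp only [List.mem_singleton] at h1; subst h1; exact Nat.mod_lt _ (by norm_num)

lemma pvDigits_ne_nil (m : ℕ) : pvDigits m ≠ [] := by
  rw [pvDigits]
  split <;> simp

def pvVal (D : List ℕ) : ℕ := D.foldl (fun v d => 10 * v + d) 0

lemma pvVal_foldl : ∀ (D : List ℕ) (a : ℕ),
    D.foldl (fun v d => 10 * v + d) a = a * 10 ^ D.length + pvVal D := by
  intro D
  induction D with
  | nil => intro a; simp [pvVal]
  | cons d D ih =>
    intro a
    have hv : pvVal (d :: D) = d * 10 ^ D.length + pvVal D := by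
      show List.foldl _ (10 * 0 + d) D = _
      rw [ih (10 * 0 + d)]; ring_nf
    simp only [List.foldl_cons, ih (10 * a + d), hv, List.length_cons]
    ring

lemma pvVal_append (D1 D2 : List ℕ) :
    pvVal (D1 ++ D2) = pvVal D1 * 10 ^ D2.length + pvVal D2 := by
  show (D1 ++ D2).foldl (fun v d => 10 * v + d) 0 = _
  rw [List.foldl_append, pvVal_foldl D2 (D1.foldl _ 0)]
  rfl

lemma pvVal_lt (D : List ℕ) (hD : ∀ d ∈ D, d < 10) : pvVal D < 10 ^ D.length := by
  induction D with
  | nil => simp [pvVal]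
  | cons d D ih =>
    have hv : pvVal (d :: D) = d * 10 ^ D.length + pvVal D := by
      show List.foldl _ (10 * 0 + d) D = _
      rw [pvVal_foldl D (10 * 0 + d)]; ring_nf
    have hd : d < 10 := hD d (List.mem_cons_self ..)
    have hih := ih (fun x hx => hD x (List.mem_cons_of_mem _ hx))
    rw [hv, List.length_cons, pow_succ]
    nlinarith

lemma pvVal_digits (m : ℕ) : pvVal (pvDigits m) = m := by
  induction m using pvDigits.induct with
  | case1 m h => rw [pvDigits, dif_pos h]; simp [pvVal]
  | case2 m h ih =>
    rw [pvDigits, dif_neg h, pvVal_append, ih]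
    simp [pvVal]
    omega

lemma pvVal_take (D : List ℕ) (hD : ∀ d ∈ D, d < 10) (i : ℕ) :
    pvVal (D.take i) = pvVal D / 10 ^ (D.length - i) := by
  have hsplit : D.take i ++ D.drop i = D := List.take_append_drop i D
  have hlen : (D.drop i).length = D.length - i := List.length_drop ..
  have hval : pvVal D = pvVal (D.take i) * 10 ^ (D.length - i) + pvVal (D.drop i) := by
    conv_lhs => rw [← hsplit]
    rw [pvVal_append, hlen]
  have hlt : pvVal (D.drop i) < 10 ^ (D.length - i) := by
    rw [← hlen]
    exact pvVal_lt _ (fun d hd => hD d (List.drop_subset i D hd))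
  have hb : 0 < 10 ^ (D.length - i) := by positivity
  have h1 : (10 ^ (D.length - i) * pvVal (D.take i) + pvVal (D.drop i)) / 10 ^ (D.length - i)
      = pvVal (D.take i) + pvVal (D.drop i) / 10 ^ (D.length - i) := Nat.mul_add_div hb _ _
  rw [hval, Nat.mul_comm (pvVal (D.take i)) _, h1, Nat.div_eq_of_lt hlt]
  omega

lemma pvVal_drop (D : List ℕ) (hD : ∀ d ∈ D, d < 10) (i : ℕ) :
    pvVal (D.drop i) = pvVal D % 10 ^ (D.length - i) := by
  have hsplit : D.take i ++ D.drop i = D := List.take_append_drop i D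
  have hlen : (D.drop i).length = D.length - i := List.length_drop ..
  have hval : pvVal D = pvVal (D.take i) * 10 ^ (D.length - i) + pvVal (D.drop i) := by
    conv_lhs => rw [← hsplit]
    rw [pvVal_append, hlen]
  have hlt : pvVal (D.drop i) < 10 ^ (D.length - i) := by
    rw [← hlen]
    exact pvVal_lt _ (fun d hd => hD d (List.drop_subset i D hd))
  rw [hval, Nat.mul_comm (pvVal (D.take i)) _, Nat.mul_add_mod, Nat.mod_eq_of_lt hlt]

-- str(n) for n ≥ 0 is exactly the decimal digits, most significant first
lemma pvTD : ∀ (f m : ℕ) (l : List Char), m < f →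
    Nat.toDigitsCore 10 f m l = (pvDigits m).map Nat.digitChar ++ l := by
  intro f
  induction f with
  | zero => intro m l h; omega
  | succ f ih =>
    intro m l h
    rw [Nat.toDigitsCore]
    by_cases h10 : m / 10 = 0
    · have hm : m < 10 := by omega
      rw [if_pos h10]
      conv_rhs => rw [pvDigits, dif_pos hm]
      simp [Nat.mod_eq_of_lt hm]
    · have hm : ¬ m < 10 := by omega
      rw [if_neg h10, ih (m / 10) _ (by omega)]
      conv_rhs => rw [pvDigits, dif_neg hm]
      simp

lemma pvToChars (n : Int) (hn : 0 ≤ n) :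
    PySem.Int.toChars n = (pvDigits n.toNat).map Nat.digitChar := by
  have hneg : ¬ n < 0 := by omega
  simp only [PySem.Int.toChars, if_neg hneg, Nat.toDigits]
  rw [pvTD (n.toNat + 1) n.toNat [] (by omega)]
  simp

lemma pvDigitChar_toNat (d : ℕ) (hd : d < 10) : (Nat.digitChar d).toNat = 48 + d := by
  interval_cases d <;> rfl

-- Horner over digit characters computes the digits' value
lemma pvHorner_digits : ∀ (D : List ℕ), (∀ d ∈ D, d < 10) → ∀ (a : ℕ),
    (D.map Nat.digitChar).foldl (fun v c => 10 * v + ((c.toNat : Int) - 48)) (a : Int)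
      = ((D.foldl (fun v d => 10 * v + d) a : ℕ) : Int) := by
  intro D
  induction D with
  | nil => intro _ a; rfl
  | cons d D ih =>
    intro hD a
    have hd : d < 10 := hD d (List.mem_cons_self ..)
    simp only [List.map_cons, List.foldl_cons]
    have hc : 10 * (a : Int) + (((Nat.digitChar d).toNat : Int) - 48) = ((10 * a + d : ℕ) : Int) := by
      rw [pvDigitChar_toNat d hd]
      push_cast
      ring
    rw [hc, ih (fun x hx => hD x (List.mem_cons_of_mem _ hx)) (10 * a + d)]

lemma pvHorner_map (D : List ℕ) (hD : ∀ d ∈ D, d < 10) :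
    pvHorner (D.map Nat.digitChar) = (pvVal D : Int) := by
  have := pvHorner_digits D hD 0
  simpa [pvHorner, pvVal] using this

-- ===== A-side loop characterisations (unchanged from the port's structure) =====

-- folding set-adds of 0 over a set already containing 0 does nothing
lemma pvFoldl_add_zeros : ∀ (k : ℕ) (res : PySem.Set Int), (0 : Int) ∈ res →
    (List.replicate k (0 : Int)).foldl PySem.Set.add res = res := by
  intro k
  induction k with
  | zero => intro res _; rfl
  | succ k ih =>
    intro res h0
    have hadd : PySem.Set.add res 0 = res := by
      simp [PySem.Set.add, PySem.Set.contains, h0]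
    rw [List.replicate_succ, List.foldl_cons, hadd]
    exact ih res h0

-- the while loop does nothing on 0
lemma pvTrunkWhileF_zero (fuel : ℕ) (res : PySem.Set Int) : trunkWhileF fuel res 0 = res := by
  cases fuel <;> simp [trunkWhileF]

-- the while loop adds exactly n//10, n//10², …, n//10^k (extra trailing zeros are absorbed)
lemma pvTrunkWhileF_eq : ∀ (k fuel : ℕ) (n : Int) (res : PySem.Set Int),
    0 ≤ n → n < 10 ^ k → (n = 0 → (0 : Int) ∈ res) → n ≤ (fuel : Int) →
    trunkWhileF fuel res n =
      ((List.range k).map (fun j => PySem.Int.floordiv n ((10 : Int) ^ (j + 1)))).foldl PySem.Set.add res := by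
  intro k
  induction k with
  | zero =>
    intro fuel n res h0 hlt _ _
    have : n = 0 := by omega
    subst this
    rw [pvTrunkWhileF_zero]
    simp
  | succ k ih =>
    intro fuel n res h0 hlt hmem hfuel
    by_cases hz : n = 0
    · subst hz
      rw [pvTrunkWhileF_zero]
      have hmap : (List.range (k + 1)).map (fun j => PySem.Int.floordiv 0 ((10 : Int) ^ (j + 1)))
          = List.replicate (k + 1) (0 : Int) := by
        rw [List.eq_replicate_iff]
        constructor
        · simp
        · intro b hb
          simp only [List.mem_map] at hb
          obtain ⟨j, _, hj⟩ := hb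
          rw [PySem.Int.floordiv_eq_ediv_of_pos (by positivity)] at hj
          simpa using hj.symm
      rw [hmap, pvFoldl_add_zeros _ _ (hmem rfl)]
    · have hpos : 0 < n := by omega
      obtain ⟨f, rfl⟩ : ∃ f, fuel = f + 1 := by
        cases fuel with
        | zero => exfalso; simp at hfuel; omega
        | succ f => exact ⟨f, rfl⟩
      rw [trunkWhileF, if_neg (by omega)]
      have hb : PySem.Int.floordiv n 10 = n / 10 := PySem.Int.floordiv_eq_ediv_of_pos (by norm_num)
      have hblt : n / 10 < 10 ^ k := by
        have : n < 10 ^ (k + 1) := hlt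
        have h2 : n / 10 * 10 ≤ n := Int.ediv_mul_le n (by norm_num)
        have : (10 : Int) ^ (k + 1) = 10 ^ k * 10 := by ring
        nlinarith [Int.ediv_mul_le n (show (10:Int) ≠ 0 by norm_num),
          Int.lt_ediv_add_one_mul_self n (show (0:Int) < 10 by norm_num)]
      have hfuel' : n / 10 ≤ (f : Int) := by
        have hc : ((f + 1 : ℕ) : Int) = (f : Int) + 1 := by push_cast; ring
        rw [hc] at hfuel
        omega
      have hrec := ih f (n / 10) (PySem.Set.add res (n / 10)) (by omega) hblt
        (by intro h; rw [h]; exact (PySem.Set.mem_add res 0 0).mpr (Or.inr rfl)) hfuel'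
      rw [hb, hrec]
      rw [List.range_succ_eq_map, List.map_cons, List.foldl_cons]
      have hhead : PySem.Int.floordiv n ((10 : Int) ^ (0 + 1)) = n / 10 := by
        rw [PySem.Int.floordiv_eq_ediv_of_pos (by positivity)]
        norm_num
      rw [hhead, List.map_map]
      congr 1
      apply List.map_congr_left
      intro j _
      simp only [Function.comp]
      rw [PySem.Int.floordiv_eq_ediv_of_pos (by positivity),
          PySem.Int.floordiv_eq_ediv_of_pos (by positivity),
          Int.ediv_ediv_of_nonneg (by norm_num)]
      have hp : (10 : Int) * 10 ^ (j + 1) = 10 ^ (j + 1 + 1) := by rw [pow_succ]; ring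
      rw [hp]

lemma pvTrunkWhile_eq (k : ℕ) (n : Int) (res : PySem.Set Int) (h0 : 0 ≤ n) (hlt : n < 10 ^ k)
    (hmem : n = 0 → (0 : Int) ∈ res) :
    trunkWhile res n =
      ((List.range k).map (fun j => PySem.Int.floordiv n ((10 : Int) ^ (j + 1)))).foldl PySem.Set.add res :=
  pvTrunkWhileF_eq k n.toNat n res h0 hlt hmem (by omega)

-- the chained-mod for loop computes the same additions as direct n % 10^i
lemma pvSuffix_fold (n : Int) : ∀ (m : ℕ) (a : Int) (s : PySem.Set Int),
    a % (10 : Int) ^ m = n % 10 ^ m →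
    ((((List.range m).map (fun t : ℕ => (m : Int) - (t : Int))).foldl
      (fun (st : PySem.Set Int × Int) i =>
        (PySem.Set.add st.1 (PySem.Int.mod st.2 ((10 : Int) ^ i.toNat)),
         PySem.Int.mod st.2 ((10 : Int) ^ i.toNat))) (s, a)).1)
    = ((((List.range m).map (fun t : ℕ => (m : Int) - (t : Int))).map
        (fun i => PySem.Int.mod n ((10 : Int) ^ i.toNat))).foldl PySem.Set.add s) := by
  intro m
  induction m with
  | zero => intro a s _; rfl
  | succ m ih =>
    intro a s hmod
    rw [List.range_succ_eq_map]
    simp only [List.map_cons, List.foldl_cons, List.map_map]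
    have htoNat : (((m : ℕ) + 1 : ℕ) : Int) - ((0 : ℕ) : Int) = ((m + 1 : ℕ) : Int) := by push_cast; ring
    have hpow : (0 : Int) < 10 ^ (m + 1) := by positivity
    have hc : PySem.Int.mod a ((10 : Int) ^ ((((m + 1 : ℕ) : Int) - ((0 : ℕ) : Int)).toNat))
        = n % 10 ^ (m + 1) := by
      have : ((((m + 1 : ℕ) : Int) - ((0 : ℕ) : Int)).toNat) = m + 1 := by omega
      rw [this, PySem.Int.mod_eq_emod_of_pos hpow, hmod]
    rw [hc]
    have hnext : (n % 10 ^ (m + 1)) % (10 : Int) ^ m = n % 10 ^ m :=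
      Int.emod_emod_of_dvd n (pow_dvd_pow 10 (by omega))
    have hih := ih (n % 10 ^ (m + 1)) (PySem.Set.add s (n % 10 ^ (m + 1))) hnext
    have hfun : ((fun t : ℕ => ((m + 1 : ℕ) : Int) - (t : Int)) ∘ Nat.succ)
        = (fun t : ℕ => (m : Int) - (t : Int)) := by
      funext t
      simp only [Function.comp]
      push_cast
      ring
    have hcn : PySem.Int.mod n ((10 : Int) ^ ((((m + 1 : ℕ) : Int) - ((0 : ℕ) : Int)).toNat))
        = n % 10 ^ (m + 1) := by
      have ht : ((((m + 1 : ℕ) : Int) - ((0 : ℕ) : Int)).toNat) = m + 1 := by omega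
      rw [ht, PySem.Int.mod_eq_emod_of_pos hpow]
    rw [hfun, hcn, ← List.map_map]
    exact hih

-- discard(0) cannot see a difference of one extra 0 in the accumulating set
lemma pvFoldl_add_filter : ∀ (S : List Int) (sL sR : PySem.Set Int),
    sL.filter (fun y => !(y == (0 : Int))) = sR.filter (fun y => !(y == 0)) → (0 : Int) ∈ sL →
    (S.foldl PySem.Set.add sL).filter (fun y => !(y == (0 : Int)))
      = (S.foldl PySem.Set.add sR).filter (fun y => !(y == 0)) := by
  intro S
  induction S with
  | nil => intro sL sR h _; exact h
  | cons x S ih =>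
    intro sL sR hf h0
    simp only [List.foldl_cons]
    by_cases hx : x = 0
    · subst hx
      have hL : PySem.Set.add sL 0 = sL := by
        simp [PySem.Set.add, PySem.Set.contains, h0]
      have hfR : (PySem.Set.add sR 0).filter (fun y => !(y == (0:Int))) = sR.filter (fun y => !(y == 0)) := by
        simp only [PySem.Set.add]
        split
        · rfl
        · simp [List.filter_append]
      exact ih _ _ (by rw [hL, hf, ← hfR]) (by rw [hL]; exact h0)
    · have hmem : x ∈ sL ↔ x ∈ sR := by
        have hqL : x ∈ sL ↔ x ∈ sL.filter (fun y => !(y == (0:Int))) := by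
          simp [List.mem_filter, hx]
        have hqR : x ∈ sR ↔ x ∈ sR.filter (fun y => !(y == (0:Int))) := by
          simp [List.mem_filter, hx]
        rw [hqL, hqR, hf]
      have hc : PySem.Set.contains sL x = PySem.Set.contains sR x := by
        show List.contains sL x = List.contains sR x
        by_cases h : x ∈ sL
        · rw [List.contains_iff_mem.mpr h, List.contains_iff_mem.mpr (hmem.mp h)]
        · have h' : x ∉ sR := fun hh => h (hmem.mpr hh)
          simp [h, h']
      have h0' : (0 : Int) ∈ PySem.Set.add sL x := (PySem.Set.mem_add sL x 0).mpr (Or.inl h0)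
      apply ih _ _ _ h0'
      simp only [PySem.Set.add, hc]
      split
      · exact hf
      · simp [List.filter_append, hf, hx]

-- range(m, 0, -1) is [m, m-1, …, 1]
lemma pvRange_desc (m : ℕ) :
    PySem.List.pyRange (m : Int) 0 (-1) = (List.range m).map (fun t : ℕ => (m : Int) - (t : Int)) := by
  rw [PySem.List.pyRange_neg_one]
  norm_num

-- add t 0 is invisible to filtering out the 0s
lemma pvFilter_add_zero (t : PySem.Set Int) :
    (PySem.Set.add t 0).filter (fun y => !(y == (0 : Int))) = t.filter (fun y => !(y == 0)) := by
  simp only [PySem.Set.add]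
  split
  · rfl
  · simp [List.filter_append]

-- ===== VERDICT (by name: the statement is the Claim_ definition above) =====
-- casts between Python's // % on Nat-cast arguments and Nat division/modulo
lemma pvDivCast (m e : ℕ) : PySem.Int.floordiv ((m : ℕ) : Int) ((10 : Int) ^ e) = ((m / 10 ^ e : ℕ) : Int) := by
  have h : ((10 : Int) ^ e) = ((10 ^ e : ℕ) : Int) := by push_cast; ring
  rw [h, PySem.Int.floordiv_natCast]

lemma pvModCast (m e : ℕ) : PySem.Int.mod ((m : ℕ) : Int) ((10 : Int) ^ e) = ((m % 10 ^ e : ℕ) : Int) := by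
  have h : ((10 : Int) ^ e) = ((10 ^ e : ℕ) : Int) := by push_cast; ring
  rw [h, PySem.Int.mod_natCast]

-- a set-building loop 'for x in L: res.add(g(x))' is a plain add-fold over the mapped values
lemma pvFoldl_add_map {A : Type} (L : List A) (g : A → Int) (init : PySem.Set Int) :
    L.foldl (fun res x => PySem.Set.add res (g x)) init = (L.map g).foldl PySem.Set.add init := by
  induction L generalizing init with
  | nil => rfl
  | cons x L ih => simp only [List.foldl_cons, List.map_cons]; exact ih _

-- adding an element already present leaves the ordered set unchanged
lemma pvAdd_mem_self (s : PySem.Set Int) (x : Int) (h : x ∈ s) : PySem.Set.add s x = s := by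
  simp [PySem.Set.add, PySem.Set.contains, h]

-- both sides reduced to ordered-set folds over the same value lists
theorem trunk_spec : Claim_equal_trunk := by
  intro n _ hpre
  have hge : (0 : Int) ≤ n := hpre
  show trunk n = trunk_alt n
  by_cases hz : n = 0
  · subst hz
    decide
  -- names for the digit data of n
  set m : ℕ := n.toNat with hmdef
  have hm0 : n = ((m : ℕ) : Int) := by omega
  set D : List ℕ := pvDigits m with hDdef
  have hDlt : ∀ d ∈ D, d < 10 := pvDigits_lt m
  set K : ℕ := D.length with hKdef
  have hK1 : 1 ≤ K := by
    have hne : D ≠ [] := by rw [hDdef]; exact pvDigits_ne_nil m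
    cases hD' : D with
    | nil => exact absurd hD' hne
    | cons a t => rw [hKdef, hD']; simp
  have hmK : m < 10 ^ K := by
    have := pvVal_lt D hDlt
    rwa [hDdef, pvVal_digits] at this
  have hlt : n < (10 : Int) ^ K := by rw [hm0]; exact_mod_cast hmK
  have hchars : PySem.Int.toChars n = D.map Nat.digitChar := pvToChars n hpre
  have hlen : PySem.Str.len (PySem.Int.toStr n) = (K : Int) := by
    rw [PySem.Str.len_eq, PySem.Int.toList_toStr, hchars, List.length_map]
  have hres0 : PySem.Set.add PySem.Set.empty n = [n] := by
    simp [PySem.Set.add, PySem.Set.empty, PySem.Set.contains]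
  -- ===== reduce A's port =====
  simp only [trunk, hlen, pvRange_desc, hres0]
  rw [pvTrunkWhile_eq K n [n] hpre hlt (fun h => absurd h hz)]
  rw [pvSuffix_fold n K n _ rfl]
  set prefA : List Int := (List.range K).map (fun j => PySem.Int.floordiv n ((10 : Int) ^ (j + 1))) with hprefA
  set sufA : List Int :=
    ((List.range K).map (fun t : ℕ => (K : Int) - (t : Int))).map
      (fun i => PySem.Int.mod n ((10 : Int) ^ i.toNat)) with hsufA
  -- the value lists in ℕ-cast form
  set prefL : List Int := (List.range K).map (fun j : ℕ => ((m / 10 ^ j : ℕ) : Int)) with hprefL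
  set sufL : List Int := (List.range (K - 1)).map (fun t : ℕ => ((m % 10 ^ (K - 1 - t) : ℕ) : Int)) with hsufL
  -- n :: prefA = prefL ++ [0]
  have hsplit : n :: prefA = prefL ++ [(0 : Int)] := by
    have h1 : n :: prefA = (List.range (K + 1)).map (fun j : ℕ => ((m / 10 ^ j : ℕ) : Int)) := by
      rw [List.range_succ_eq_map, List.map_cons, List.map_map, hprefA]
      congr 1
      · rw [hm0]; norm_num
      · apply List.map_congr_left
        intro j _
        simp only [Function.comp, Nat.succ_eq_add_one]
        rw [hm0, pvDivCast]
    rw [h1, List.range_succ, List.map_append, List.map_cons, List.map_nil, hprefL,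
      Nat.div_eq_of_lt hmK]
    rfl
  -- sufA = n :: sufL
  have hsufA' : sufA = (List.range K).map (fun t : ℕ => ((m % 10 ^ (K - t) : ℕ) : Int)) := by
    rw [hsufA, List.map_map]
    apply List.map_congr_left
    intro t ht
    simp only [List.mem_range] at ht
    simp only [Function.comp]
    have he : (((K : ℕ) : Int) - ((t : ℕ) : Int)).toNat = K - t := by omega
    rw [he, hm0, pvModCast]
  have hsufsplit : sufA = n :: sufL := by
    have hKsucc : K = (K - 1) + 1 := by omega
    rw [hsufA', hKsucc, List.range_succ_eq_map, List.map_cons, List.map_map]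
    congr 1
    · have he : (K - 1 + 1) - 0 = K := by omega
      rw [he, Nat.mod_eq_of_lt hmK]
      exact hm0.symm
    · rw [hsufL]
      apply List.map_congr_left
      intro t _
      simp only [Function.comp, Nat.succ_eq_add_one]
      have he : K - 1 + 1 - (t + 1) = K - 1 - t := by omega
      rw [he]
  -- ===== reduce B's port =====
  have hBpref : (List.range K).map
      (fun t : ℕ => pvHorner (PySem.List.slice (PySem.Int.toStr n).toList none (some ((K : Int) - (t : Int)))))
      = prefL := by
    rw [hprefL]
    apply List.map_congr_left
    intro t ht
    simp only [List.mem_range] at ht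
    have hb : (0 : Int) ≤ (K : Int) - (t : Int) := by omega
    rw [PySem.List.slice_to _ hb, PySem.Int.toList_toStr, hchars]
    have htn : ((K : Int) - (t : Int)).toNat = K - t := by omega
    rw [htn, ← List.map_take, pvHorner_map _ (fun d hd => hDlt d (List.take_subset _ _ hd)),
      pvVal_take D hDlt (K - t), hDdef, pvVal_digits]
    have hexp : D.length - (K - t) = t := by omega
    rw [hDdef] at hexp
    rw [hexp]
  have hBsuf : (List.range (K - 1)).map
      (fun k : ℕ => pvHorner (PySem.List.slice (PySem.Int.toStr n).toList (some ((1 : Int) + (k : Int))) none))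
      = sufL := by
    rw [hsufL]
    apply List.map_congr_left
    intro k hk
    simp only [List.mem_range] at hk
    have hb : (0 : Int) ≤ (1 : Int) + (k : Int) := by omega
    rw [PySem.List.slice_from _ hb, PySem.Int.toList_toStr, hchars]
    have htn : ((1 : Int) + (k : Int)).toNat = k + 1 := by omega
    rw [htn, ← List.map_drop, pvHorner_map _ (fun d hd => hDlt d (List.drop_subset _ _ hd)),
      pvVal_drop D hDlt (k + 1), hDdef, pvVal_digits]
    have hexp : D.length - (k + 1) = K - 1 - k := by omega
    rw [hDdef] at hexp
    rw [hexp]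
  have hRange1 : PySem.List.pyRange 1 (K : Int) 1
      = (List.range (K - 1)).map (fun k : ℕ => (1 : Int) + (k : Int)) := by
    rw [PySem.List.pyRange_one]
    have h1 : ((K : Int) - 1).toNat = K - 1 := by omega
    rw [h1]
  have hB : trunk_alt n = PySem.Set.discard (sufL.foldl PySem.Set.add (prefL.foldl PySem.Set.add PySem.Set.empty)) 0 := by
    simp only [trunk_alt, hlen, pvRange_desc, hRange1]
    rw [pvFoldl_add_map ((List.range K).map (fun t : ℕ => (K : Int) - (t : Int)))
        (fun i => pvHorner (PySem.List.slice (PySem.Int.toStr n).toList none (some i))) PySem.Set.empty]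
    rw [pvFoldl_add_map ((List.range (K - 1)).map (fun k : ℕ => (1 : Int) + (k : Int)))
        (fun i => pvHorner (PySem.List.slice (PySem.Int.toStr n).toList (some i) none)) _]
    rw [List.map_map, List.map_map]
    simp only [Function.comp_def]
    rw [hBpref, hBsuf]
  rw [hB]
  -- ===== the two folds build the same ordered set =====
  set sR : PySem.Set Int := prefL.foldl PySem.Set.add PySem.Set.empty with hsR
  have hA1 : prefA.foldl PySem.Set.add [n] = PySem.Set.add sR 0 := by
    have h0 : ([n] : PySem.Set Int) = PySem.Set.add PySem.Set.empty n := hres0.symm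
    rw [h0, ← List.foldl_cons, hsplit, List.foldl_append]
    rfl
  have hnpref : n ∈ prefL := by
    rw [hprefL]
    refine List.mem_map.mpr ⟨0, List.mem_range.mpr (by omega), ?_⟩
    rw [hm0]
    norm_num
  have hnsR : n ∈ sR := by
    show n ∈ PySem.Set.update PySem.Set.empty prefL
    rw [PySem.Set.mem_update]
    right
    exact hnpref
  have hn0 : n ∈ PySem.Set.add sR 0 := (PySem.Set.mem_add sR 0 n).mpr (Or.inl hnsR)
  have hA2 : sufA.foldl PySem.Set.add (PySem.Set.add sR 0)
      = sufL.foldl PySem.Set.add (PySem.Set.add sR 0) := by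
    rw [hsufsplit, List.foldl_cons, pvAdd_mem_self (PySem.Set.add sR 0) n hn0]
  rw [hA1, hA2]
  -- remove(0) succeeds: 0 is in the set
  have h0L : (0 : Int) ∈ PySem.Set.add sR 0 := (PySem.Set.mem_add sR 0 0).mpr (Or.inr rfl)
  have h0mem : (0 : Int) ∈ sufL.foldl PySem.Set.add (PySem.Set.add sR 0) := by
    show (0 : Int) ∈ PySem.Set.update (PySem.Set.add sR 0) sufL
    rw [PySem.Set.mem_update]
    left
    exact h0L
  have hremove : PySem.Set.remove? (sufL.foldl PySem.Set.add (PySem.Set.add sR 0)) (0 : Int)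
      = some (PySem.Set.discard (sufL.foldl PySem.Set.add (PySem.Set.add sR 0)) 0) := by
    simp [PySem.Set.remove?, PySem.Set.contains, h0mem]
  rw [hremove]
  simp only [Option.getD_some]
  simp only [PySem.Set.discard]
  exact pvFoldl_add_filter sufL _ _ (pvFilter_add_zero sR) h0L
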